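-- pv_equiv track=rewrite | github.com/kipawaa/Advent-Of-Code | 2023/day 9/sequences.py | sum_backward_extrapolations
-- ===== SOURCE A (Python) =====
-- def get_difference_sequence(sequence):
--     diffs = []
--     for i in range(len(sequence) - 1):
--         diffs.append(sequence[i+1] - sequence[i])
--     return diffs
--
-- def sum_backward_extrapolations(sequences):
--     sequences = [[int(i) for i in sequence.split()] for sequence in sequences]
--     total = 0
--     for sequence in sequences:
--         diffs = [sequence]
--         while sum(diffs[-1]) != 0:
--             diffs.append(get_difference_sequence(diffs[-1]))
--
--         diffs[-1].insert(0, 0)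
--         for i in range(len(diffs)-2, -1, -1):
--             diffs[i].insert(0, diffs[i][0] - diffs[i+1][0])
--
--         total += diffs[0][0]
--     return total
-- ===== SOURCE B (Python) =====
-- def sum_backward_extrapolations(sequences):
--     total = 0
--     for line in sequences:
--         row = [int(t) for t in line.split()]
--         sign, acc = 1, 0
--         while sum(row) != 0:
--             acc += sign * row[0]
--             sign = -sign
--             row = [b - a for a, b in zip(row, row[1:])]
--         total += acc
--     return total
-- ===== Notes on version B (the rewrite author's own statement) =====
-- stated objective: simpler
-- what changed: Replaces A's stored pyramid of all difference rows plus the bottom-up insert(0,...) back-pass with a single forward loop that accumulates an alternating signed sum of row heads (acc += sign*row[0]) while shrinking one row via pairwise zip differences, keeping no rows.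
import Mathlib
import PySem

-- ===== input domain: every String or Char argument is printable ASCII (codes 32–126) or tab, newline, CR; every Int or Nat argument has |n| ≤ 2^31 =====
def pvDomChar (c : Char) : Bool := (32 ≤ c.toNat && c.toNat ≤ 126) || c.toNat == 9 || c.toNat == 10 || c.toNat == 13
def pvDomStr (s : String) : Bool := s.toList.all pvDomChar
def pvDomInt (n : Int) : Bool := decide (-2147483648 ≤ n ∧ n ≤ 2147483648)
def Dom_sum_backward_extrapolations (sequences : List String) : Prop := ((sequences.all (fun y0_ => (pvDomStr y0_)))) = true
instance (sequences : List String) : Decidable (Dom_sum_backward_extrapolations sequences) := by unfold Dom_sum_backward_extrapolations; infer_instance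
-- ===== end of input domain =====

-- B replaces A's stored pyramid of difference rows + bottom-up insert(0,..) back-pass with one
-- forward loop accumulating an alternating signed sum of row heads (simpler; same asymptotic cost).

-- ===== PORT A =====

-- get_difference_sequence: diffs.append(sequence[i+1] - sequence[i]) for i in range(len(sequence)-1)
def pvDiffSeq (sequence : List Int) : List Int :=
  (PySem.List.pyRange 0 ((sequence.length : Int) - 1) 1).foldl
    (fun diffs i =>
      diffs ++ [PySem.List.pyGetD sequence (i + 1) 0 - PySem.List.pyGetD sequence i 0])
    []

theorem pvDiffSeq_length_lt (s : List Int) (h : s ≠ []) : (pvDiffSeq s).length < s.length := by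
  have hlen : ∀ (acc : List Int) (r : List Int),
      ((r.foldl (fun diffs i =>
        diffs ++ [PySem.List.pyGetD s (i + 1) 0 - PySem.List.pyGetD s i 0]) acc).length)
        = acc.length + r.length := by
    intro acc r
    induction r generalizing acc with
    | nil => simp
    | cons x xs ih => rw [List.foldl_cons, ih]; simp [List.length_append]; omega
  have h1 : (pvDiffSeq s).length
      = (PySem.List.pyRange 0 ((s.length : Int) - 1) 1).length := by
    rw [pvDiffSeq, hlen]; simp
  have h2 : (PySem.List.pyRange 0 ((s.length : Int) - 1) 1).length = s.length - 1 := by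
    rw [PySem.List.pyRange_of_pos 0 ((s.length : Int) - 1) (s := 1) (by omega)]
    simp
    have : 0 < s.length := List.length_pos_iff.mpr h
    omega
  have : 0 < s.length := List.length_pos_iff.mpr h
  omega

-- the while loop: diffs = [sequence]; while sum(diffs[-1]) != 0: diffs.append(diff(diffs[-1]))
-- (each appended row is one shorter, so the loop is structural recursion on the row length)
def pvBuildRows (cur : List Int) : List (List Int) :=
  if cur.sum ≠ 0 then cur :: pvBuildRows (pvDiffSeq cur) else [cur]
termination_by cur.length
decreasing_by
  exact pvDiffSeq_length_lt cur (by rintro rfl; simp at *)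

-- the backward pass: diffs[-1].insert(0, 0); then for i from len-2 down to 0:
-- diffs[i].insert(0, diffs[i][0] - diffs[i+1][0]); processed back-to-front as recursion.
-- (headD 0 is a totality guard for row[0]; every row this is applied to is nonempty.)
def pvBackPass : List (List Int) → List (List Int)
  | [] => []
  | [last] => [(0 : Int) :: last]
  | row :: next :: rest =>
    let r := pvBackPass (next :: rest)
    ((row.headD 0 - (r.headD []).headD 0) :: row) :: r

def sum_backward_extrapolations (sequences : List String) : Int :=
  -- int(i) for i in sequence.split(); Pre_ excludes ValueError, so getD 0 is never taken
  let parsed := sequences.map (fun s =>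
    (PySem.Str.split₀ s).map (fun t => (PySem.Int.ofStr? t).getD 0))
  parsed.foldl (fun total sequence =>
    total + ((pvBackPass (pvBuildRows sequence)).headD []).headD 0) 0

-- ===== PORT B =====

-- row = [b - a for a, b in zip(row, row[1:])]
def pvZipDiff (row : List Int) : List Int :=
  (row.zip row.tail).map (fun p => p.2 - p.1)

theorem pvZipDiff_length_lt (row : List Int) (h : row ≠ []) :
    (pvZipDiff row).length < row.length := by
  have : 0 < row.length := List.length_pos_iff.mpr h
  simp [pvZipDiff]; omega

-- while sum(row) != 0: acc += sign * row[0]; sign = -sign; row = zip-diff(row)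
def pvLoop (row : List Int) (sign acc : Int) : Int :=
  if row.sum = 0 then acc
  else pvLoop (pvZipDiff row) (-sign) (acc + sign * row.headD 0)   -- row[0]; nonempty here
termination_by row.length
decreasing_by
  exact pvZipDiff_length_lt row (by rintro rfl; simp at *)

def sum_backward_extrapolations_alt (sequences : List String) : Int :=
  sequences.foldl (fun total line =>
    total + pvLoop ((PySem.Str.split₀ line).map (fun t => (PySem.Int.ofStr? t).getD 0)) 1 0) 0

-- ===== PRECONDITION & SPEC =====
-- Pre_ excludes exactly the inputs where int() raises ValueError on some whitespace token.
def Pre_sum_backward_extrapolations (sequences : List String) : Prop :=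
  ∀ s ∈ sequences, ∀ t ∈ PySem.Str.split₀ s, (PySem.Int.ofStr? t).isSome
instance (sequences : List String) : Decidable (Pre_sum_backward_extrapolations sequences) := by
  unfold Pre_sum_backward_extrapolations; infer_instance

def pvWitness_sum_backward_extrapolations : List String := ["1 2 3", "0", ""]

def Spec_sum_backward_extrapolations (sequences : List String) (out : Int) : Prop :=
  out = sum_backward_extrapolations_alt sequences
instance (sequences : List String) (out : Int) :
    Decidable (Spec_sum_backward_extrapolations sequences out) := by
  unfold Spec_sum_backward_extrapolations; infer_instance

-- ===== CLAIM (what is proved, stated in full; the proofs are below) =====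
def Claim_equal_sum_backward_extrapolations : Prop :=
  ∀ (sequences : List String), Dom_sum_backward_extrapolations sequences →
    Pre_sum_backward_extrapolations sequences →
    Spec_sum_backward_extrapolations sequences (sum_backward_extrapolations sequences)

-- ===== LEMMAS AND PROOFS =====

-- A's index-loop difference sequence equals B's pairwise-zip difference sequence
theorem pvDiffSeq_eq_zipDiff (s : List Int) : pvDiffSeq s = pvZipDiff s := by
  have hmap : pvDiffSeq s
      = (PySem.List.pyRange 0 ((s.length : Int) - 1) 1).map
          (fun i => PySem.List.pyGetD s (i + 1) 0 - PySem.List.pyGetD s i 0) := by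
    rw [pvDiffSeq, PySem.List.foldl_append_singleton_eq_map]; simp
  rw [hmap, PySem.List.pyRange_one]
  rcases s with _ | ⟨x, xs⟩
  · simp [pvZipDiff]
  · apply List.ext_getElem
    · simp [pvZipDiff]
    · intro i h1 h2
      simp only [List.getElem_map, List.getElem_range, pvZipDiff, List.getElem_zip,
        List.tail_cons]
      have hi : i < xs.length := by simpa [pvZipDiff] using h2
      have hcast : ((0 : Int) + (i : Int)) = (i : Int) := by ring
      rw [hcast]
      have h1' : PySem.List.pyGetD (x :: xs) ((i : Int) + 1) 0 = xs[i] := by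
        have := PySem.List.pyGetD_natCast (xs := x :: xs) (n := i + 1) (d := 0)
        push_cast at this
        rw [this, List.getD_cons_succ, List.getD_eq_getElem _ _ hi]
      have h0' : PySem.List.pyGetD (x :: xs) (i : Int) 0
          = (x :: xs)[i]'(by simp; omega) := by
        rw [PySem.List.pyGetD_natCast, List.getD_eq_getElem]
      rw [h1', h0']

theorem pvBuildRows_ne_nil (s : List Int) : pvBuildRows s ≠ [] := by
  unfold pvBuildRows
  split <;> simp

-- proof-side characterisation of A's per-sequence value as a recursion
def pvE (sequence : List Int) : Int :=
  if sequence.sum = 0 then 0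
  else sequence.headD 0 - pvE (pvDiffSeq sequence)
termination_by sequence.length
decreasing_by
  exact pvDiffSeq_length_lt sequence (by rintro rfl; simp at *)

-- per-sequence: A's pyramid + back-pass head equals the recursion pvE
theorem pvKey (s : List Int) :
    ((pvBackPass (pvBuildRows s)).headD []).headD 0 = pvE s := by
  fun_induction pvBuildRows s with
  | case1 cur hne ih =>
    rcases hrest : pvBuildRows (pvDiffSeq cur) with _ | ⟨r, rs⟩
    · exact absurd hrest (pvBuildRows_ne_nil _)
    · rw [hrest] at ih
      rw [pvBackPass]
      simp only [List.headD_cons]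
      rw [ih]
      conv_rhs => rw [pvE.eq_def]
      rw [if_neg hne]
  | case2 cur hz =>
    rw [pvBackPass]
    simp only [List.headD_cons]
    rw [pvE.eq_def]
    simp at hz
    simp [hz]

-- B's accumulator loop computes acc + sign * pvE row
theorem pvLoop_eq (row : List Int) (sign acc : Int) :
    pvLoop row sign acc = acc + sign * pvE row := by
  fun_induction pvLoop row sign acc with
  | case1 row sign acc hz =>
    rw [pvE.eq_def, if_pos hz]; ring
  | case2 row sign acc hz ih =>
    rw [ih]
    conv_rhs => rw [pvE.eq_def]
    rw [if_neg hz, pvDiffSeq_eq_zipDiff]; ring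

theorem pvFoldSum (l : List (List Int)) (acc : Int) :
    l.foldl (fun total sequence =>
      total + ((pvBackPass (pvBuildRows sequence)).headD []).headD 0) acc
    = acc + (l.map pvE).sum := by
  induction l generalizing acc with
  | nil => simp
  | cons x xs ih =>
    rw [List.foldl_cons, pvKey, ih, List.map_cons, List.sum_cons]
    ring

theorem pvFoldSumB (l : List String) (acc : Int) :
    l.foldl (fun total line =>
      total + pvLoop ((PySem.Str.split₀ line).map (fun t => (PySem.Int.ofStr? t).getD 0)) 1 0) acc
    = acc + (l.map (fun line =>
        pvE ((PySem.Str.split₀ line).map (fun t => (PySem.Int.ofStr? t).getD 0)))).sum := by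
  induction l generalizing acc with
  | nil => simp
  | cons x xs ih =>
    rw [List.foldl_cons, pvLoop_eq, ih, List.map_cons, List.sum_cons]
    ring

-- ===== VERDICT (by name: the statement is the Claim_ definition above) =====
theorem sum_backward_extrapolations_spec : Claim_equal_sum_backward_extrapolations := by
  intro sequences _ _
  unfold Spec_sum_backward_extrapolations sum_backward_extrapolations
    sum_backward_extrapolations_alt
  rw [pvFoldSum, pvFoldSumB, List.map_map]
  rfl
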